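-- pv_equiv track=rewrite | github.com/jason-dio-so/insurance-ontology-v3 | ingestion/parsers/form_parser.py | _match_header_data_rows
-- ===== SOURCE A (Python) =====
-- from typing import List, Dict, Any, Tuple, Optional
--
-- def _match_header_data_rows(header_row: List[str], data_row: List[str]) -> List[Tuple[str, str]]:
--     """Match header cells with data cells by position"""
--     pairs = []
--
--     header_cells = [(i, c.strip()) for i, c in enumerate(header_row) if c.strip()]
--     data_cells = [(i, c.strip()) for i, c in enumerate(data_row) if c.strip()]
--
--     used_headers = set()
--
--     for data_idx, data_val in data_cells:
--         best_header = None
--         best_distance = float('inf')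
--
--         for header_idx, header_text in header_cells:
--             if header_idx in used_headers:
--                 continue
--
--             distance = abs(data_idx - header_idx)
--             if distance < best_distance:
--                 best_distance = distance
--                 best_header = (header_idx, header_text)
--
--         if best_header and best_distance <= 3:
--             used_headers.add(best_header[0])
--             pairs.append((best_header[1], data_val))
--
--     return pairs
-- ===== SOURCE B (Python) =====
-- from typing import List, Tuple
--
-- def _match_header_data_rows(header_row: List[str], data_row: List[str]) -> List[Tuple[str, str]]:
--     """Match header cells with data cells by position"""
--     avail = {i: c.strip() for i, c in enumerate(header_row) if c.strip()}
--     pairs = []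
--     for d, c in enumerate(data_row):
--         v = c.strip()
--         if not v:
--             continue
--         for o in (0, -1, 1, -2, 2, -3, 3):
--             h = d + o
--             if h in avail:
--                 pairs.append((avail.pop(h), v))
--                 break
--     return pairs
-- ===== Notes on version B (the rewrite author's own statement) =====
-- stated objective: faster
-- what changed: B replaces A's inner linear scan over all header cells per data cell by a dict of available header columns probed at the 7 candidate offsets 0,-1,1,-2,2,-3,3 (A's preference order: smallest distance, ties to the lower index), popping a matched header.
import Mathlib
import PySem

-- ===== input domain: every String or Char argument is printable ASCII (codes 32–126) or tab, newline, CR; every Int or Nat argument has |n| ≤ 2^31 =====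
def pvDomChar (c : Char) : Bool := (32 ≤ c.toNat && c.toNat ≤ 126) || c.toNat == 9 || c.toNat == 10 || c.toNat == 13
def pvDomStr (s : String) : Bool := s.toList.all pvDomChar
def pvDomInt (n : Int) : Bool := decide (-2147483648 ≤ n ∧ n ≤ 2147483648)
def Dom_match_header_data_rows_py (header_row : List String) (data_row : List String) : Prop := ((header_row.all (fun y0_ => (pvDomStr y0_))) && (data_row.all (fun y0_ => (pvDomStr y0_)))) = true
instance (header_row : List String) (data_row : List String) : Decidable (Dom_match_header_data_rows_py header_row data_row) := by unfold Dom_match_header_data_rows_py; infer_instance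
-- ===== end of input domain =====

-- B replaces A's inner linear scan over all unused headers by a dict of available
-- header columns probed at the 7 candidate offsets 0,-1,1,-2,2,-3,3 (A's preference
-- order: smaller distance first, ties to the lower index), popping a header when matched.

-- ===== PORT A =====
-- [(i, c.strip()) for i, c in enumerate(row) if c.strip()]
def pvCells (row : List String) : List (Int × String) :=
  ((PySem.List.enumerate row).filter (fun p => PySem.Str.strip p.2 ≠ "")).map
    (fun p => (p.1, PySem.Str.strip p.2))

-- body of A's inner 'for header_idx, header_text in header_cells' loop
def pvAStep (used : PySem.Set Int) (d : Int) (st : Option (Int × String) × Option Int)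
    (hc : Int × String) : Option (Int × String) × Option Int :=
  if PySem.Set.contains used hc.1 then st
  else
    let distance : Int := |d - hc.1|
    match st.2 with
    | none => (some hc, some distance)              -- distance < float('inf')
    | some b => if distance < b then (some hc, some distance) else st

-- A's inner loop: best_header, best_distance after scanning header_cells
def pvAInner (H : List (Int × String)) (used : PySem.Set Int) (d : Int) :
    Option (Int × String) × Option Int :=
  H.foldl (pvAStep used d) (none, none)

-- body of A's outer 'for data_idx, data_val in data_cells' loop
def pvAOuter (H : List (Int × String)) (st : List (String × String) × PySem.Set Int)
    (dc : Int × String) : List (String × String) × PySem.Set Int :=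
  let r := pvAInner H st.2 dc.1
  match r.1, r.2 with
  | some bh, some bd =>
      if bd ≤ 3 then (st.1 ++ [(bh.2, dc.2)], PySem.Set.add st.2 bh.1) else st
  | _, _ => st

def match_header_data_rows_py (header_row : List String) (data_row : List String) :
    List (String × String) :=
  ((pvCells data_row).foldl (pvAOuter (pvCells header_row)) ([], PySem.Set.empty)).1

-- ===== PORT B =====
def pvOffsets : List Int := [0, -1, 1, -2, 2, -3, 3]

-- body of B's loop once the stripped value v is known to be non-empty
def pvBCore (st : List (String × String) × PySem.Dict Int String) (d : Int) (v : String) :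
    List (String × String) × PySem.Dict Int String :=
  match pvOffsets.find? (fun o => (st.2).contains (d + o)) with
  | none => st
  | some o => (st.1 ++ [((st.2).getD (d + o) "", v)], (st.2).erase (d + o))

-- body of B's 'for d, c in enumerate(data_row)' loop
def pvBStep (st : List (String × String) × PySem.Dict Int String) (p : Int × String) :
    List (String × String) × PySem.Dict Int String :=
  let v := PySem.Str.strip p.2
  if v = "" then st else pvBCore st p.1 v

def match_header_data_rows_py_alt (header_row : List String) (data_row : List String) :
    List (String × String) :=
  let avail : PySem.Dict Int String :=
    (PySem.List.enumerate header_row).foldl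
      (fun d p =>
        let s := PySem.Str.strip p.2
        if s ≠ "" then d.insert p.1 s else d)
      PySem.Dict.empty
  ((PySem.List.enumerate data_row).foldl pvBStep ([], avail)).1
-- ===== PRECONDITION & SPEC =====
def Spec_match_header_data_rows_py (header_row : List String) (data_row : List String) (out : List (String × String)) : Prop := out = match_header_data_rows_py_alt header_row data_row
instance (header_row : List String) (data_row : List String) (out : List (String × String)) : Decidable (Spec_match_header_data_rows_py header_row data_row out) := by unfold Spec_match_header_data_rows_py; infer_instance

-- ===== CLAIM (what is proved, stated in full; the proofs are below) =====
def Claim_equal_match_header_data_rows_py : Prop := ∀ (header_row : List String) (data_row : List String), Dom_match_header_data_rows_py header_row data_row → Spec_match_header_data_rows_py header_row data_row (match_header_data_rows_py header_row data_row)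

-- ===== LEMMAS AND PROOFS =====

def pvF (d : Int) (st : Option (Int × String) × Option Int) (hc : Int × String) :
    Option (Int × String) × Option Int :=
  let distance : Int := |d - hc.1|
  match st.2 with
  | none => (some hc, some distance)
  | some b => if distance < b then (some hc, some distance) else st

lemma scan_keep (d : Int) (L : List (Int × String)) (e : Int × String) (b : Int)
    (hb : ∀ x ∈ L, b ≤ |d - x.1|) :
    L.foldl (pvF d) (some e, some b) = (some e, some b) := by
  induction L with
  | nil => rfl
  | cons x xs ih =>
    have hx := hb x (by simp)
    simp only [List.foldl_cons, pvF]
    rw [if_neg (by omega)]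
    exact ih (fun y hy => hb y (by simp [hy]))

lemma scan_found_aux (d : Int) (L : List (Int × String)) (h0t : Int × String)
    (hL : L.Pairwise (fun a b => a.1 < b.1)) (hmem : h0t ∈ L)
    (hmin : ∀ x ∈ L, |d - h0t.1| ≤ |d - x.1|)
    (hlow : ∀ x ∈ L, |d - x.1| = |d - h0t.1| → h0t.1 ≤ x.1) :
    ∀ (e : Int × String) (b : Int), |d - h0t.1| < b →
      L.foldl (pvF d) (some e, some b) = (some h0t, some (|d - h0t.1|)) := by
  induction L with
  | nil => simp at hmem
  | cons x xs ih =>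
    intro e b hb
    rcases List.mem_cons.mp hmem with hx | hx
    · subst hx
      simp only [List.foldl_cons, pvF]
      rw [if_pos hb]
      exact scan_keep d xs h0t _ (fun y hy => hmin y (by simp [hy]))
    · -- h0t ∈ xs, x ≠ h0t (keys distinct)
      have hxk : x.1 < h0t.1 := (List.pairwise_cons.mp hL).1 h0t hx
      have hstrict : |d - h0t.1| < |d - x.1| := by
        rcases lt_or_eq_of_le (hmin x (by simp)) with h | h
        · exact h
        · exact absurd (hlow x (by simp) h.symm) (by omega)
      have ih' := ih (List.pairwise_cons.mp hL).2 hx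
        (fun y hy => hmin y (by simp [hy]))
        (fun y hy => hlow y (by simp [hy]))
      simp only [List.foldl_cons, pvF]
      by_cases hc : |d - x.1| < b
      · rw [if_pos hc]; exact ih' x _ hstrict
      · rw [if_neg hc]; exact ih' e b hb

lemma scan_found (d : Int) (L : List (Int × String)) (h0t : Int × String)
    (hL : L.Pairwise (fun a b => a.1 < b.1)) (hmem : h0t ∈ L)
    (hmin : ∀ x ∈ L, |d - h0t.1| ≤ |d - x.1|)
    (hlow : ∀ x ∈ L, |d - x.1| = |d - h0t.1| → h0t.1 ≤ x.1) :
    L.foldl (pvF d) (none, none) = (some h0t, some (|d - h0t.1|)) := by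
  cases L with
  | nil => simp at hmem
  | cons x xs =>
    simp only [List.foldl_cons, pvF]
    rcases List.mem_cons.mp hmem with hx | hx
    · subst hx
      exact scan_keep d xs h0t _ (fun y hy => hmin y (by simp [hy]))
    · have hxk : x.1 < h0t.1 := (List.pairwise_cons.mp hL).1 h0t hx
      have hstrict : |d - h0t.1| < |d - x.1| := by
        rcases lt_or_eq_of_le (hmin x (by simp)) with h | h
        · exact h
        · exact absurd (hlow x (by simp) h.symm) (by omega)
      exact scan_found_aux d xs h0t (List.pairwise_cons.mp hL).2 hx
        (fun y hy => hmin y (by simp [hy]))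
        (fun y hy => hlow y (by simp [hy])) x _ hstrict

lemma scan_far (d : Int) (L : List (Int × String))
    (hfar : ∀ x ∈ L, 3 < |d - x.1|) :
    ∀ st : Option (Int × String) × Option Int,
      (∀ b, st.2 = some b → 3 < b) →
      ∀ b', (L.foldl (pvF d) st).2 = some b' → 3 < b' := by
  induction L with
  | nil => intro st h b' hb'; exact h b' hb'
  | cons x xs ih =>
    intro st h b' hb'
    refine ih (fun y hy => hfar y (by simp [hy])) (pvF d st x) ?_ b' hb'
    intro b hb
    simp only [pvF] at hb
    rcases hst : st.2 with _ | c
    · rw [hst] at hb; simp at hb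
      subst hb; exact hfar x (by simp)
    · rw [hst] at hb; dsimp only at hb
      by_cases hlt : |d - x.1| < c
      · rw [if_pos hlt] at hb; simp at hb; subst hb; exact hfar x (by simp)
      · rw [if_neg hlt] at hb; exact h b hb

lemma far_of_absent (L : List (Int × String)) (d k : Int)
    (habs : ∀ j : Int, |j| < k → L.any (fun p => p.1 == d + j) = false) :
    ∀ x ∈ L, k ≤ |d - x.1| := by
  intro x hx
  by_contra hlt
  rw [not_le] at hlt
  have hj : |x.1 - d| < k := by rw [abs_sub_comm]; exact hlt
  have := habs (x.1 - d) hj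
  rw [List.any_eq_false] at this
  exact this x hx (by rw [beq_iff_eq]; omega)

lemma found_case (L : List (Int × String)) (hL : L.Pairwise (fun a b => a.1 < b.1))
    (d h0 : Int) (hc0 : L.any (fun p => p.1 == h0) = true)
    (hmin : ∀ x ∈ L, |d - h0| ≤ |d - x.1|)
    (hlow : ∀ x ∈ L, |d - x.1| = |d - h0| → h0 ≤ x.1) :
    ∃ t, (h0, t) ∈ L ∧ L.foldl (pvF d) (none, none) = (some (h0, t), some (|d - h0|)) := by
  rw [List.any_eq_true] at hc0
  obtain ⟨x, hx, hxk⟩ := hc0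
  have hxk' : x.1 = h0 := by simpa using hxk
  refine ⟨x.2, ?_, ?_⟩
  · rw [← hxk']; exact hx
  · have : (h0, x.2) = x := by rw [← hxk']
    rw [this]
    have := scan_found d L x hL hx (by rw [hxk']; exact hmin) (by rw [hxk']; exact hlow)
    rw [hxk'] at this; exact this

lemma pvAInner_eq (H : List (Int × String)) (used : PySem.Set Int) (d : Int) :
    pvAInner H used d
      = (H.filter (fun hc => !(PySem.Set.contains used hc.1))).foldl (pvF d) (none, none) := by
  unfold pvAInner
  have h1 := PySem.List.foldl_congr_mem (l := H) (init := ((none, none) : Option (Int × String) × Option Int))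
      (f := pvAStep used d)
      (g := fun st hc => if (!(PySem.Set.contains used hc.1)) = true then pvF d st hc else st)
      (fun st hc _ => by by_cases hcz : PySem.Set.contains used hc.1 <;>
          simp [pvAStep, pvF])
  rw [h1]
  exact PySem.List.foldl_if_eq_foldl_filter _ _ _ _

lemma contains_add (used : PySem.Set Int) (h0 y : Int) :
    PySem.Set.contains (PySem.Set.add used h0) y
      = (PySem.Set.contains used y || (y == h0)) := by
  by_cases hy : h0 ∈ used
  · rw [PySem.Set.add_of_mem hy]
    by_cases hyh : y = h0 <;> simp [PySem.Set.contains, hyh, hy]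
  · rw [PySem.Set.add_of_not_mem hy]
    simp [PySem.Set.contains]
    by_cases hyh : y = h0 <;> simp [hyh]

lemma keys_nodup_of_pairwise (L : List (Int × String))
    (hL : L.Pairwise (fun a b => a.1 < b.1)) : (L.map Prod.fst).Nodup :=
  List.pairwise_map.mpr (hL.imp (fun h => ne_of_lt h))

lemma branch_found (H : List (Int × String)) (hH : H.Pairwise (fun a b => a.1 < b.1))
    (pairs : List (String × String)) (used : PySem.Set Int) (avail : PySem.Dict Int String)
    (hinv : avail.items = H.filter (fun hc => !(PySem.Set.contains used hc.1)))
    (d o : Int) (v : String) (hosmall : |o| ≤ 3)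
    (hc : avail.contains (d + o) = true)
    (hmin : ∀ x ∈ (H.filter (fun hc => !(PySem.Set.contains used hc.1))),
        |d - (d + o)| ≤ |d - x.1|)
    (hlow : ∀ x ∈ (H.filter (fun hc => !(PySem.Set.contains used hc.1))),
        |d - x.1| = |d - (d + o)| → (d + o) ≤ x.1) :
    pvAOuter H (pairs, used) (d, v)
        = (pairs ++ [(avail.getD (d + o) "", v)], PySem.Set.add used (d + o)) ∧
    (avail.erase (d + o)).items
      = H.filter (fun hc => !(PySem.Set.contains (PySem.Set.add used (d + o)) hc.1)) := by
  set L := H.filter (fun hc => !(PySem.Set.contains used hc.1)) with hLdef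
  have hLp : L.Pairwise (fun a b => a.1 < b.1) := List.Pairwise.filter _ hH
  have hanyL : L.any (fun p => p.1 == d + o) = true := by
    rw [← hinv]; simpa [PySem.Dict.contains] using hc
  obtain ⟨t, hmem, hscan⟩ := found_case L hLp d (d + o) hanyL hmin hlow
  have habs : |d - (d + o)| = |o| := by
    rw [show d - (d + o) = -o by ring, abs_neg]
  have hgetD : avail.getD (d + o) "" = t := by
    apply PySem.Dict.getD_of_mem_items
    · rw [hinv]; exact hmem
    · show (avail.items.map Prod.fst).Nodup
      rw [hinv]; exact keys_nodup_of_pairwise L hLp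
  constructor
  · simp only [pvAOuter, pvAInner_eq, ← hLdef, hscan]
    rw [if_pos (by omega)]
    rw [hgetD]
  · show (avail.items.filter (fun p => !(p.1 == d + o)))
        = H.filter (fun hc => !(PySem.Set.contains (PySem.Set.add used (d + o)) hc.1))
    rw [hinv, List.filter_filter]
    apply List.filter_congr
    intro a _
    rw [contains_add, Bool.not_or, Bool.and_comm]

lemma branch_none (H : List (Int × String))
    (pairs : List (String × String)) (used : PySem.Set Int) (avail : PySem.Dict Int String)
    (hinv : avail.items = H.filter (fun hc => !(PySem.Set.contains used hc.1)))
    (d : Int) (v : String)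
    (hfar : ∀ x ∈ (H.filter (fun hc => !(PySem.Set.contains used hc.1))), 3 < |d - x.1|) :
    pvAOuter H (pairs, used) (d, v) = (pairs, used) := by
  set L := H.filter (fun hc => !(PySem.Set.contains used hc.1)) with hLdef
  have hbig := scan_far d L hfar (none, none) (by simp)
  simp only [pvAOuter, pvAInner_eq, ← hLdef]
  rcases hscan : L.foldl (pvF d) (none, none) with ⟨b1, b2⟩
  rcases b1 with _ | bh <;> rcases b2 with _ | bd <;> dsimp only
  all_goals first
    | rfl
    | rw [if_neg (by have := hbig bd (by rw [hscan]); omega)]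

lemma not_key (L : List (Int × String)) (d j : Int)
    (hfalse : L.any (fun p => p.1 == d + j) = false) : ∀ x ∈ L, x.1 ≠ d + j := by
  intro x hx h
  exact absurd (by simp [h]) (List.any_eq_false.mp hfalse x hx)

lemma abs_shift (d o : Int) : |d - (d + o)| = |o| := by
  rw [show d - (d + o) = -o by ring, abs_neg]

lemma step_eq (H : List (Int × String)) (hH : H.Pairwise (fun a b => a.1 < b.1))
    (pairs : List (String × String)) (used : PySem.Set Int) (avail : PySem.Dict Int String)
    (hinv : avail.items = H.filter (fun hc => !(PySem.Set.contains used hc.1)))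
    (d : Int) (v : String) :
    (pvAOuter H (pairs, used) (d, v)).1 = (pvBCore (pairs, avail) d v).1 ∧
    (pvBCore (pairs, avail) d v).2.items
      = H.filter (fun hc => !(PySem.Set.contains (pvAOuter H (pairs, used) (d, v)).2 hc.1)) := by
  set L := H.filter (fun hc => !(PySem.Set.contains used hc.1)) with hLdef
  have hcont : ∀ k : Int, avail.contains k = L.any (fun p => p.1 == k) := by
    intro k; simp only [PySem.Dict.contains, hinv]
  simp only [pvBCore, pvOffsets, List.find?_cons, List.find?_nil]
  by_cases c0 : avail.contains (d + 0) = true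
  · rw [c0]; dsimp only
    obtain ⟨hA, hE⟩ := branch_found H hH pairs used avail hinv d 0 v (by decide) c0
      (by
        intro x hx
        rw [abs_shift]
        have : |(0 : Int)| = 0 := by norm_num
        rw [this]
        exact abs_nonneg _)
      (by
        intro x hx hx2
        rw [abs_shift] at hx2
        have h0 : |(0 : Int)| = 0 := by norm_num
        rw [h0] at hx2
        have := abs_eq_zero.mp hx2
        omega)
    exact ⟨by rw [hA], by rw [hA]; exact hE⟩
  · have c0' : avail.contains (d + 0) = false := by
      revert c0; cases avail.contains (d + 0) <;> simp
    rw [c0']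
    by_cases c1 : avail.contains (d + -1) = true
    · rw [c1]; dsimp only
      obtain ⟨hA, hE⟩ := branch_found H hH pairs used avail hinv d (-1) v (by decide) c1
        (by
          intro x hx
          rw [abs_shift, show |(-1 : Int)| = 1 by norm_num]
          refine far_of_absent L d 1 ?_ x hx
          intro j hj
          have : j = 0 := by rw [abs_lt] at hj; omega
          subst this; rw [← hcont]; exact c0')
        (by
          intro x hx hx2
          rw [abs_shift, show |(-1 : Int)| = 1 by norm_num] at hx2
          have := (abs_eq (by norm_num : (0:Int) ≤ 1)).mp hx2
          omega)
      exact ⟨by rw [hA], by rw [hA]; exact hE⟩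
    · have c1' : avail.contains (d + -1) = false := by
        revert c1; cases avail.contains (d + -1) <;> simp
      rw [c1']
      by_cases c2 : avail.contains (d + 1) = true
      · rw [c2]; dsimp only
        obtain ⟨hA, hE⟩ := branch_found H hH pairs used avail hinv d 1 v (by decide) c2
          (by
            intro x hx
            rw [abs_shift, show |(1 : Int)| = 1 by norm_num]
            refine far_of_absent L d 1 ?_ x hx
            intro j hj
            have : j = 0 := by rw [abs_lt] at hj; omega
            subst this; rw [← hcont]; exact c0')
          (by
            intro x hx hx2
            rw [abs_shift, show |(1 : Int)| = 1 by norm_num] at hx2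
            have h2 := (abs_eq (by norm_num : (0:Int) ≤ 1)).mp hx2
            have hne := not_key L d (-1) (by rw [← hcont]; exact c1') x hx
            omega)
        exact ⟨by rw [hA], by rw [hA]; exact hE⟩
      · have c2' : avail.contains (d + 1) = false := by
          revert c2; cases avail.contains (d + 1) <;> simp
        rw [c2']
        by_cases c3 : avail.contains (d + -2) = true
        · rw [c3]; dsimp only
          obtain ⟨hA, hE⟩ := branch_found H hH pairs used avail hinv d (-2) v (by decide) c3
            (by
              intro x hx
              rw [abs_shift, show |(-2 : Int)| = 2 by norm_num]
              refine far_of_absent L d 2 ?_ x hx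
              intro j hj
              have : j = -1 ∨ j = 0 ∨ j = 1 := by rw [abs_lt] at hj; omega
              rcases this with h | h | h <;> subst h <;> rw [← hcont] <;> assumption)
            (by
              intro x hx hx2
              rw [abs_shift, show |(-2 : Int)| = 2 by norm_num] at hx2
              have := (abs_eq (by norm_num : (0:Int) ≤ 2)).mp hx2
              omega)
          exact ⟨by rw [hA], by rw [hA]; exact hE⟩
        · have c3' : avail.contains (d + -2) = false := by
            revert c3; cases avail.contains (d + -2) <;> simp
          rw [c3']
          by_cases c4 : avail.contains (d + 2) = true
          · rw [c4]; dsimp only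
            obtain ⟨hA, hE⟩ := branch_found H hH pairs used avail hinv d 2 v (by decide) c4
              (by
                intro x hx
                rw [abs_shift, show |(2 : Int)| = 2 by norm_num]
                refine far_of_absent L d 2 ?_ x hx
                intro j hj
                have : j = -1 ∨ j = 0 ∨ j = 1 := by rw [abs_lt] at hj; omega
                rcases this with h | h | h <;> subst h <;> rw [← hcont] <;> assumption)
              (by
                intro x hx hx2
                rw [abs_shift, show |(2 : Int)| = 2 by norm_num] at hx2
                have h2 := (abs_eq (by norm_num : (0:Int) ≤ 2)).mp hx2
                have hne := not_key L d (-2) (by rw [← hcont]; exact c3') x hx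
                omega)
            exact ⟨by rw [hA], by rw [hA]; exact hE⟩
          · have c4' : avail.contains (d + 2) = false := by
              revert c4; cases avail.contains (d + 2) <;> simp
            rw [c4']
            by_cases c5 : avail.contains (d + -3) = true
            · rw [c5]; dsimp only
              obtain ⟨hA, hE⟩ := branch_found H hH pairs used avail hinv d (-3) v (by decide) c5
                (by
                  intro x hx
                  rw [abs_shift, show |(-3 : Int)| = 3 by norm_num]
                  refine far_of_absent L d 3 ?_ x hx
                  intro j hj
                  have : j = -2 ∨ j = -1 ∨ j = 0 ∨ j = 1 ∨ j = 2 := by rw [abs_lt] at hj; omega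
                  rcases this with h | h | h | h | h <;> subst h <;> rw [← hcont] <;> assumption)
                (by
                  intro x hx hx2
                  rw [abs_shift, show |(-3 : Int)| = 3 by norm_num] at hx2
                  have := (abs_eq (by norm_num : (0:Int) ≤ 3)).mp hx2
                  omega)
              exact ⟨by rw [hA], by rw [hA]; exact hE⟩
            · have c5' : avail.contains (d + -3) = false := by
                revert c5; cases avail.contains (d + -3) <;> simp
              rw [c5']
              by_cases c6 : avail.contains (d + 3) = true
              · rw [c6]; dsimp only
                obtain ⟨hA, hE⟩ := branch_found H hH pairs used avail hinv d 3 v (by decide) c6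
                  (by
                    intro x hx
                    rw [abs_shift, show |(3 : Int)| = 3 by norm_num]
                    refine far_of_absent L d 3 ?_ x hx
                    intro j hj
                    have : j = -2 ∨ j = -1 ∨ j = 0 ∨ j = 1 ∨ j = 2 := by rw [abs_lt] at hj; omega
                    rcases this with h | h | h | h | h <;> subst h <;> rw [← hcont] <;> assumption)
                  (by
                    intro x hx hx2
                    rw [abs_shift, show |(3 : Int)| = 3 by norm_num] at hx2
                    have h2 := (abs_eq (by norm_num : (0:Int) ≤ 3)).mp hx2
                    have hne := not_key L d (-3) (by rw [← hcont]; exact c5') x hx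
                    omega)
                exact ⟨by rw [hA], by rw [hA]; exact hE⟩
              · have c6' : avail.contains (d + 3) = false := by
                  revert c6; cases avail.contains (d + 3) <;> simp
                rw [c6']
                dsimp only
                have habs : ∀ j : Int, |j| < 4 → L.any (fun p => p.1 == d + j) = false := by
                  intro j hj
                  have : j = -3 ∨ j = -2 ∨ j = -1 ∨ j = 0 ∨ j = 1 ∨ j = 2 ∨ j = 3 := by
                    rw [abs_lt] at hj; omega
                  rcases this with h | h | h | h | h | h | h <;> subst h <;>
                    rw [← hcont] <;> assumption
                have hfar : ∀ x ∈ L, 3 < |d - x.1| := by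
                  intro x hx
                  have := far_of_absent L d 4 habs x hx
                  omega
                have hA := branch_none H pairs used avail hinv d v hfar
                exact ⟨by rw [hA], by rw [hA]; exact hinv⟩

lemma loop_eq (H : List (Int × String)) (hH : H.Pairwise (fun a b => a.1 < b.1)) :
    ∀ (L : List (Int × String)) (pairs : List (String × String)) (used : PySem.Set Int)
      (avail : PySem.Dict Int String),
      avail.items = H.filter (fun hc => !(PySem.Set.contains used hc.1)) →
      (L.foldl (fun st p => pvAOuter H st (p.1, PySem.Str.strip p.2)) (pairs, used)).1
        = (L.foldl (fun st p => pvBCore st p.1 (PySem.Str.strip p.2)) (pairs, avail)).1 := by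
  intro L
  induction L with
  | nil => intro pairs used avail _; rfl
  | cons p L ih =>
    intro pairs used avail hinv
    simp only [List.foldl_cons]
    obtain ⟨h1, h2⟩ := step_eq H hH pairs used avail hinv p.1 (PySem.Str.strip p.2)
    have hb : (pvBCore (pairs, avail) p.1 (PySem.Str.strip p.2))
        = ((pvAOuter H (pairs, used) (p.1, PySem.Str.strip p.2)).1,
           (pvBCore (pairs, avail) p.1 (PySem.Str.strip p.2)).2) := by
      rw [h1]
    rw [hb]
    exact ih _ _ _ h2

lemma cells_pairwise (row : List String) :
    (pvCells row).Pairwise (fun a b => a.1 < b.1) := by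
  unfold pvCells
  refine List.pairwise_map.mpr ?_
  exact List.Pairwise.imp (fun h => h)
    (List.Pairwise.filter _ (PySem.List.pairwise_lt_enumerate row 0))

lemma bstep_eq (st : List (String × String) × PySem.Dict Int String) (p : Int × String) :
    pvBStep st p
      = if (PySem.Str.strip p.2 ≠ "") then pvBCore st p.1 (PySem.Str.strip p.2) else st := by
  simp only [pvBStep]
  by_cases h : PySem.Str.strip p.2 = "" <;> simp [h]

lemma avail_items (hr : List String) :
    ((PySem.List.enumerate hr).foldl
      (fun d p =>
        let s := PySem.Str.strip p.2
        if s ≠ "" then d.insert p.1 s else d)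
      PySem.Dict.empty).items = pvCells hr := by
  rw [PySem.List.foldl_congr_mem
      (l := PySem.List.enumerate hr) (init := PySem.Dict.empty)
      (f := fun d p =>
        let s := PySem.Str.strip p.2
        if s ≠ "" then d.insert p.1 s else d)
      (g := fun (dct : PySem.Dict Int String) p =>
        if (PySem.Str.strip p.2 ≠ "") then dct.insert p.1 (PySem.Str.strip p.2) else dct)
      (fun a x _ => rfl)]
  rw [PySem.List.foldl_ite_eq_foldl_filter]
  rw [PySem.Dict.items_foldl_insert_fresh
      (l := (PySem.List.enumerate hr).filter (fun p => PySem.Str.strip p.2 ≠ ""))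
      (k := fun p => p.1) (v := fun p => PySem.Str.strip p.2) (d := PySem.Dict.empty)
      (fun a _ => by simp [PySem.Dict.contains, PySem.Dict.empty])
      (keys_nodup_of_pairwise _ (List.Pairwise.filter _ (PySem.List.pairwise_lt_enumerate hr 0)))]
  rfl

theorem main_lemma : ∀ (header_row data_row : List String),
    match_header_data_rows_py header_row data_row
      = match_header_data_rows_py_alt header_row data_row := by
  intro hr dr
  simp only [match_header_data_rows_py, match_header_data_rows_py_alt]
  rw [PySem.List.foldl_congr_mem
      (l := PySem.List.enumerate dr)
      (init := (([], (PySem.List.enumerate hr).foldl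
          (fun d p =>
            let s := PySem.Str.strip p.2
            if s ≠ "" then d.insert p.1 s else d)
          PySem.Dict.empty) : List (String × String) × PySem.Dict Int String))
      (f := pvBStep)
      (g := fun st p =>
        if (PySem.Str.strip p.2 ≠ "") then pvBCore st p.1 (PySem.Str.strip p.2) else st)
      (fun st p _ => bstep_eq st p)]
  rw [PySem.List.foldl_ite_eq_foldl_filter
      (p := fun p : Int × String => PySem.Str.strip p.2 ≠ "")
      (f := fun st p => pvBCore st p.1 (PySem.Str.strip p.2))]
  have hmap : pvCells dr
      = ((PySem.List.enumerate dr).filter (fun p => PySem.Str.strip p.2 ≠ "")).map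
          (fun p => (p.1, PySem.Str.strip p.2)) := rfl
  rw [hmap, List.foldl_map]
  refine loop_eq (pvCells hr) (cells_pairwise hr) _ [] PySem.Set.empty _ ?_
  rw [avail_items]
  have : ∀ hc : Int × String, (!(PySem.Set.contains PySem.Set.empty hc.1)) = true := by
    intro hc; rfl
  simp

-- ===== VERDICT (by name: the statement is the Claim_ definition above) =====
theorem match_header_data_rows_py_spec : Claim_equal_match_header_data_rows_py := by
  intro hr dr _
  unfold Spec_match_header_data_rows_py
  exact main_lemma hr dr
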